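-- pv_equiv track=rewrite | github.com/xin-shang/ICT_SP5_Team47_PythonCodeChecker | project/bin/python/PYDb_QnSFunction.py | transferTXT2ScoreList
-- ===== SOURCE A (Python) =====
-- def transferTXT2ScoreList(score_list):
--     count = 0
--     #a value for short memory
--     mark_point = ""
--     new_score = 0
--
--     #create a list to store each lines of data
--     mark_list = []
--     for character in score_list:
--         if(count%2 == 0):
--             mark_point = remove_space(character)
--         else:
--             new_score = remove_space(character)
--             signle_mk = (mark_point,new_score)
--             mark_list.append(signle_mk)
--         count = count + 1
--     return mark_list
--
-- def remove_space(string):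
--     if(string[0] == " "):
--         return string[1:]
--     else:
--         return string
-- ===== SOURCE B (Python) =====
-- def remove_space(string):
--     if(string[0] == " "):
--         return string[1:]
--     else:
--         return string
--
-- def transferTXT2ScoreList(score_list):
--     cleaned = [remove_space(c) for c in score_list]
--     return [(cleaned[i], cleaned[i + 1]) for i in range(0, len(cleaned) - 1, 2)]
-- ===== Notes on version B (the rewrite author's own statement) =====
-- stated objective: alternative
-- what changed: Replaces A's single stateful loop (parity counter plus remembered mark_point) by two staged passes: first clean every element into a new list, then index-step that list with range(0, len-1, 2) and read each pair by random access cleaned[i], cleaned[i+1].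
import Mathlib
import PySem

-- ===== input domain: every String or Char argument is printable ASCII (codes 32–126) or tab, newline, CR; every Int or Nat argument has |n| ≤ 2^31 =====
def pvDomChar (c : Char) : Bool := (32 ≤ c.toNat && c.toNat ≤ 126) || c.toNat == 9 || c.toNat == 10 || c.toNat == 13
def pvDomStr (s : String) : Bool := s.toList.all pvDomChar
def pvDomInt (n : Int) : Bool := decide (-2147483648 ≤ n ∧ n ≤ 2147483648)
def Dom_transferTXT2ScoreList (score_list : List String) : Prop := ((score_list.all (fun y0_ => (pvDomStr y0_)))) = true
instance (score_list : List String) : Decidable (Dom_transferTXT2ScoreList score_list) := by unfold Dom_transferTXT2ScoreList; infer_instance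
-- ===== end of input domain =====

-- B is a two-stage reformulation: clean every element in one map pass, then index-step
-- the cleaned list with range(0, len-1, 2), reading each pair by random access
-- (objective: alternative; A's parity counter and remembered mark_point disappear).

-- ===== PORT A =====

-- remove_space: string[0] raises IndexError on "" (excluded by Pre_); the none branch is never reached on Pre_.
def removeSpaceA (s : String) : String :=
  match PySem.Str.pyGet? s 0 with
  | some c => if c = ' ' then PySem.Str.slice s (some 1) none else s
  | none => s

-- A's for-loop: state = (count, mark_point, accumulated mark_list); new_score is
-- consumed immediately after assignment, so it is inlined into the append.
def loopA : List String → Int → String → List (String × String) → List (String × String)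
  | [], _, _, acc => acc
  | c :: rest, count, mp, acc =>
      if PySem.Int.mod count 2 = 0 then
        loopA rest (count + 1) (removeSpaceA c) acc
      else
        loopA rest (count + 1) mp (acc ++ [(mp, removeSpaceA c)])

def transferTXT2ScoreList (score_list : List String) : List (String × String) :=
  loopA score_list 0 "" []

-- ===== PORT B =====

def removeSpaceB (s : String) : String :=
  match PySem.Str.pyGet? s 0 with
  | some c => if c = ' ' then PySem.Str.slice s (some 1) none else s
  | none => s

-- Source B's indices are always in range (i ≤ len-2), so pyGetD's default "" is never read.
def transferTXT2ScoreList_alt (score_list : List String) : List (String × String) :=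
  let cleaned := score_list.map removeSpaceB
  (PySem.List.pyRange 0 (PySem.List.len cleaned - 1) 2).map
    (fun i => (PySem.List.pyGetD cleaned i "", PySem.List.pyGetD cleaned (i + 1) ""))

-- ===== PRECONDITION & SPEC =====
-- Pre_ excludes lists containing an empty string: remove_space (in both A and B) raises IndexError there.
def Pre_transferTXT2ScoreList (score_list : List String) : Prop :=
  ∀ s ∈ score_list, s ≠ ""
instance (score_list : List String) : Decidable (Pre_transferTXT2ScoreList score_list) := by
  unfold Pre_transferTXT2ScoreList; infer_instance

def pvWitness_transferTXT2ScoreList : List String := [" a", "1", "b", " 2"]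

def Spec_transferTXT2ScoreList (score_list : List String) (out : List (String × String)) : Prop := out = transferTXT2ScoreList_alt score_list
instance (score_list : List String) (out : List (String × String)) : Decidable (Spec_transferTXT2ScoreList score_list out) := by unfold Spec_transferTXT2ScoreList; infer_instance

-- ===== CLAIM (what is proved, stated in full; the proofs are below) =====
def Claim_equal_transferTXT2ScoreList : Prop := ∀ (score_list : List String), Dom_transferTXT2ScoreList score_list → Pre_transferTXT2ScoreList score_list → Spec_transferTXT2ScoreList score_list (transferTXT2ScoreList score_list)

-- ===== LEMMAS AND PROOFS =====

theorem removeSpace_eq (s : String) : removeSpaceA s = removeSpaceB s := rfl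

-- canonical form both sides are reduced to: consecutive pairing of a list
def pairsOf : List String → List (String × String)
  | a :: b :: rest => (a, b) :: pairsOf rest
  | _ => []

-- loop invariant for A: from an even counter, the loop appends exactly the
-- consecutive pairs of the cleaned tail.
theorem loopA_even : ∀ (l : List String) (count : Int) (mp : String)
    (acc : List (String × String)), PySem.Int.mod count 2 = 0 →
    loopA l count mp acc = acc ++ pairsOf (l.map removeSpaceB)
  | [], _, _, _, _ => by simp [loopA, pairsOf]
  | [c], count, mp, acc, h => by
      simp only [loopA]
      rw [if_pos h]
      simp [pairsOf]
  | c :: d :: rest, count, mp, acc, h => by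
      have h1 : ¬ PySem.Int.mod (count + 1) 2 = 0 := by
        rw [PySem.Int.mod_eq_zero_iff_dvd] at h ⊢; omega
      have h2 : PySem.Int.mod (count + 1 + 1) 2 = 0 := by
        rw [PySem.Int.mod_eq_zero_iff_dvd] at h ⊢; omega
      simp only [loopA]
      rw [if_pos h, if_neg h1]
      rw [loopA_even rest (count + 1 + 1) (removeSpaceA c)
            (acc ++ [(removeSpaceA c, removeSpaceA d)]) h2]
      simp [pairsOf, removeSpace_eq]

-- index version over List.range equals consecutive pairing
theorem range_pairs : ∀ (l : List String),
    (List.range (l.length / 2)).map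
      (fun k => (l.getD (2 * k) "", l.getD (2 * k + 1) "")) = pairsOf l
  | [] => by simp [pairsOf]
  | [a] => by simp [pairsOf]
  | a :: b :: rest => by
      have hl : (a :: b :: rest).length / 2 = rest.length / 2 + 1 := by
        simp [List.length]; omega
      rw [hl, List.range_succ_eq_map, List.map_cons, List.map_map]
      simp only [pairsOf]
      congr 1
      rw [← range_pairs rest]
      apply List.map_congr_left; intro k _
      simp only [Function.comp_apply, Nat.succ_eq_add_one]
      have e1 : 2 * (k + 1) = 2 * k + 1 + 1 := by ring
      simp only [e1, List.getD_cons_succ]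

-- B's port reduces to the same canonical pairing
theorem alt_eq_pairs (l : List String) :
    transferTXT2ScoreList_alt l = pairsOf (l.map removeSpaceB) := by
  simp only [transferTXT2ScoreList_alt]
  generalize l.map removeSpaceB = c
  rw [PySem.List.pyRange_of_pos 0 _ (by norm_num), ← range_pairs c, List.map_map]
  congr 1
  · funext k
    simp only [Function.comp_apply]
    have e2 : (0 : Int) + 2 * (k : Int) + 1 = ((2 * k + 1 : Nat) : Int) := by
      push_cast; ring
    have e1 : (0 : Int) + 2 * (k : Int) = ((2 * k : Nat) : Int) := by
      push_cast; ring
    rw [e2, e1, PySem.List.pyGetD_natCast, PySem.List.pyGetD_natCast]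
  · congr 1
    simp only [PySem.List.len_eq]
    split_ifs with h <;> omega

-- ===== VERDICT (by name: the statement is the Claim_ definition above) =====
theorem transferTXT2ScoreList_spec : Claim_equal_transferTXT2ScoreList := by
  intro score_list _ _
  unfold Spec_transferTXT2ScoreList transferTXT2ScoreList
  rw [alt_eq_pairs]
  simpa using loopA_even score_list 0 "" [] (by decide)
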